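-- pv_equiv track=rewrite | github.com/ParkJeongmiin/Algorithm | 프로그래머스/lv1/118666. 성격 유형 검사하기/성격 유형 검사하기.py | solution
-- ===== SOURCE A (Python) =====
-- def solution(survey, choices):
--     answer = ''
--
--     kind = ['R', 'T', 'C', 'F', 'J', 'M', 'A', 'N']
--     dict = {_ : 0 for _ in kind}
--
--     s = [3, 2, 1, 0, 1, 2, 3]
--     score = {i+1 : s[i] for i in range(len(s))}
--
--     for sur, choice in zip(survey, choices):
--         if choice < 4:
--             dict[sur[0]] += score[choice]
--         elif choice > 4:
--             dict[sur[1]] += score[choice]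
--
--     # 앞에서 2개씩 쪼개면서 크기 비교해서 answer에 더하기
--     for idx in range(0, len(dict), 2):
--         if dict[kind[idx]] > dict[kind[idx + 1]]:
--             answer += list(dict.keys())[idx]
--         elif dict[kind[idx]] < dict[kind[idx + 1]]:
--             answer += list(dict.keys())[idx + 1]
--         else:
--             same_score_kind = list(dict.keys())[idx: idx + 2]
--             same_score_kind.sort()
--             answer += same_score_kind[0]
--
--     return answer
-- ===== SOURCE B (Python) =====
-- def solution(survey, choices):
--     def lean(letter):
--         # total weight of the answers that lean toward `letter`
--         return sum(4 - c if c < 4 else c - 4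
--                    for s, c in zip(survey, choices)
--                    if (c < 4 and s[0] == letter) or (c > 4 and s[1] == letter))
--     return ''.join(a if lean(a) >= lean(b) else b for a, b in ['RT', 'CF', 'JM', 'AN'])
-- ===== Notes on version B (the rewrite author's own statement) =====
-- stated objective: alternative
-- what changed: B drops A's mutable eight-key counter dict and its second compare/slice/sort pass entirely: it recomputes each letter's support on demand with an independent filtered-sum pass over zip(survey, choices) (a pure per-letter query, no accumulator state), and picks pair[0] on >= which coincides with A's alphabetical tie sort.
import Mathlib
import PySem

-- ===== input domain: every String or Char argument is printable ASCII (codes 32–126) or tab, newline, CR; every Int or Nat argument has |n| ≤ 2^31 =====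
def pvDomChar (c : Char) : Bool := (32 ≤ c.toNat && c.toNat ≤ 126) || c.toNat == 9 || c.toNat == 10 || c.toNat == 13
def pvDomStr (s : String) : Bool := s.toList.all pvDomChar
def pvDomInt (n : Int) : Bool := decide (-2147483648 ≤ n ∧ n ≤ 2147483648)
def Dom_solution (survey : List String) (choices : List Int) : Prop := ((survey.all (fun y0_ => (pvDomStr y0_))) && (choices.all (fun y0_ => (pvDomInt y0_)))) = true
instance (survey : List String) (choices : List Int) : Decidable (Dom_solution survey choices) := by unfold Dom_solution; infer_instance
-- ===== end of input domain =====

-- B replaces A's mutable counter dict + compare/slice/sort pass by stateless per-letter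
-- filtered-sum queries; objective: alternative. Equal return value proved on Pre_ (where A returns).


-- ===== PORT A =====
def pvKind : List Char := ['R', 'T', 'C', 'F', 'J', 'M', 'A', 'N']

-- score = {i+1 : s[i] for i in range(len(s))}   with s = [3, 2, 1, 0, 1, 2, 3]
def pvScore : PySem.Dict Int Int :=
  (PySem.List.pyRange 0 7 1).foldl
    (fun sc i => sc.insert (i + 1) (PySem.List.pyGetD [3, 2, 1, 0, 1, 2, 3] i 0))
    PySem.Dict.empty

def solution (survey : List String) (choices : List Int) : String :=
  -- dict = {_ : 0 for _ in kind}
  let d0 : PySem.Dict Char Int := pvKind.foldl (fun d k => d.insert k 0) PySem.Dict.empty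
  -- for sur, choice in zip(survey, choices): …
  let d := (survey.zip choices).foldl
    (fun (d : PySem.Dict Char Int) (p : String × Int) =>
      if p.2 < 4 then
        let k := (PySem.Str.pyGet? p.1 0).getD ' '   -- dict[sur[0]] += score[choice]
        d.insert k (d.getD k 0 + pvScore.getD p.2 0)
      else if p.2 > 4 then
        let k := (PySem.Str.pyGet? p.1 1).getD ' '   -- dict[sur[1]] += score[choice]
        d.insert k (d.getD k 0 + pvScore.getD p.2 0)
      else d) d0
  -- for idx in range(0, len(dict), 2): …
  let answer := (PySem.List.pyRange 0 (PySem.Dict.size d) 2).foldl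
    (fun (ans : List Char) idx =>
      if d.getD (PySem.List.pyGetD pvKind idx ' ') 0 > d.getD (PySem.List.pyGetD pvKind (idx + 1) ' ') 0 then
        ans ++ [PySem.List.pyGetD d.keys idx ' ']
      else if d.getD (PySem.List.pyGetD pvKind idx ' ') 0 < d.getD (PySem.List.pyGetD pvKind (idx + 1) ' ') 0 then
        ans ++ [PySem.List.pyGetD d.keys (idx + 1) ' ']
      else
        -- same_score_kind = list(dict.keys())[idx:idx+2]; same_score_kind.sort(); answer += same_score_kind[0]
        let same := PySem.List.sorted (PySem.List.slice d.keys (some idx) (some (idx + 2))) (fun c => c)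
        ans ++ [PySem.List.pyGetD same 0 ' ']) []
  String.mk answer

-- ===== PORT B =====
-- lean(letter) = sum(4-c if c<4 else c-4 for s,c in zip(survey,choices)
--                    if (c<4 and s[0]==letter) or (c>4 and s[1]==letter))
def pvLean (l : List (String × Int)) (letter : Char) : Int :=
  ((l.filter (fun p =>
      (decide (p.2 < 4) && ((PySem.Str.pyGet? p.1 0).getD ' ' == letter)) ||
      (decide (p.2 > 4) && ((PySem.Str.pyGet? p.1 1).getD ' ' == letter)))).map
    (fun p => if p.2 < 4 then 4 - p.2 else p.2 - 4)).sum

def solution_alt (survey : List String) (choices : List Int) : String :=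
  String.mk ((["RT", "CF", "JM", "AN"] : List String).map (fun pair =>
    let a := (PySem.Str.pyGet? pair 0).getD ' '
    let b := (PySem.Str.pyGet? pair 1).getD ' '
    if pvLean (survey.zip choices) a ≥ pvLean (survey.zip choices) b then a else b))

-- ===== PRECONDITION & SPEC =====
-- Pre_ excludes exactly the inputs where the Python A raises: a zipped choice < 4 outside {1,2,3}
-- or > 4 outside {5,6,7} (KeyError on score), or a survey code too short at the consulted position
-- (IndexError) or whose consulted letter is outside the eight personality types (KeyError on dict).
def Pre_solution (survey : List String) (choices : List Int) : Prop :=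
  ∀ p ∈ survey.zip choices,
    (p.2 < 4 → (p.2 = 1 ∨ p.2 = 2 ∨ p.2 = 3) ∧ p.1.toList ≠ [] ∧ p.1.toList.getD 0 ' ' ∈ pvKind) ∧
    (4 < p.2 → (p.2 = 5 ∨ p.2 = 6 ∨ p.2 = 7) ∧ 2 ≤ p.1.toList.length ∧ p.1.toList.getD 1 ' ' ∈ pvKind)
instance (survey : List String) (choices : List Int) : Decidable (Pre_solution survey choices) := by
  unfold Pre_solution; infer_instance

def pvWitness_solution : List String × List Int := (["RT", "CF", "JM", "AN"], [1, 5, 4, 7])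

def Spec_solution (survey : List String) (choices : List Int) (out : String) : Prop := out = solution_alt survey choices
instance (survey : List String) (choices : List Int) (out : String) : Decidable (Spec_solution survey choices out) := by unfold Spec_solution; infer_instance

-- ===== CLAIM (what is proved, stated in full; the proofs are below) =====
def Claim_equal_solution : Prop := ∀ (survey : List String) (choices : List Int), Dom_solution survey choices → Pre_solution survey choices → Spec_solution survey choices (solution survey choices)
-- ===== LEMMAS AND PROOFS =====

-- per-element weight that `letter` receives from one zipped answer
def pvW (ch : Char) (p : String × Int) : Int :=
  if p.2 < 4 then (if (PySem.Str.pyGet? p.1 0).getD ' ' = ch then 4 - p.2 else 0)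
  else if 4 < p.2 then (if (PySem.Str.pyGet? p.1 1).getD ' ' = ch then p.2 - 4 else 0)
  else 0

lemma pvLean_foldr (l : List (String × Int)) (ch : Char) :
    pvLean l ch = l.foldr (fun p acc => pvW ch p + acc) 0 := by
  induction l with
  | nil => rfl
  | cons p l ih =>
    rw [List.foldr_cons, ← ih]
    by_cases h1 : p.2 < 4
    · by_cases h2 : (PySem.List.pyGet? p.1.toList 0).getD ' ' = ch
      · simp [pvLean, List.filter_cons, pvW, h1, h2, List.sum_cons, show ¬ (4 < p.2) from by omega]
      · simp [pvLean, List.filter_cons, pvW, h1, h2, show ¬ (4 < p.2) from by omega]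
    · by_cases h3 : 4 < p.2
      · by_cases h2 : (PySem.List.pyGet? p.1.toList 1).getD ' ' = ch
        · simp [pvLean, List.filter_cons, pvW, h1, h2, h3, List.sum_cons]
        · simp [pvLean, List.filter_cons, pvW, h1, h2, h3]
      · simp [pvLean, List.filter_cons, pvW, h1, h3]

lemma pvScore_low (c : Int) (hc : c = 1 ∨ c = 2 ∨ c = 3) : pvScore.getD c 0 = 4 - c := by
  rcases hc with h | h | h <;> subst h <;> decide

lemma pvScore_high (c : Int) (hc : c = 5 ∨ c = 6 ∨ c = 7) : pvScore.getD c 0 = c - 4 := by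
  rcases hc with h | h | h <;> subst h <;> decide

lemma pvGetChar (s : String) (n : Nat) (h : n < s.toList.length) :
    (PySem.Str.pyGet? s (n : Int)).getD ' ' = s.toList.getD n ' ' := by
  simp [PySem.Str.pyGet?]

-- add w to counter k: keys unchanged, every getD shifted by the k-match
lemma pvBump (d : PySem.Dict Char Int) (hk : d.keys = pvKind) (k : Char) (hkm : k ∈ pvKind)
    (w : Int) (ch : Char) :
    (d.insert k (d.getD k 0 + w)).keys = pvKind ∧
    (d.insert k (d.getD k 0 + w)).getD ch 0 = d.getD ch 0 + (if k = ch then w else 0) := by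
  have hcont : d.contains k = true := by
    rw [PySem.Dict.contains_iff_mem_keys, hk]; exact hkm
  refine ⟨(PySem.Dict.keys_insert_of_contains d _ hcont).trans hk, ?_⟩
  rw [PySem.Dict.getD_insert]
  by_cases hc : ch = k
  · subst hc; simp
  · rw [if_neg hc, if_neg (fun h : k = ch => hc h.symm)]; ring

-- main loop invariant: keys stay pvKind and each counter equals its pvW-sum
lemma pvLoop (l : List (String × Int)) (d : PySem.Dict Char Int) (hk : d.keys = pvKind)
    (hpre : ∀ p ∈ l,
      (p.2 < 4 → (p.2 = 1 ∨ p.2 = 2 ∨ p.2 = 3) ∧ p.1.toList ≠ [] ∧ p.1.toList.getD 0 ' ' ∈ pvKind) ∧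
      (4 < p.2 → (p.2 = 5 ∨ p.2 = 6 ∨ p.2 = 7) ∧ 2 ≤ p.1.toList.length ∧ p.1.toList.getD 1 ' ' ∈ pvKind)) :
    (l.foldl
      (fun (d : PySem.Dict Char Int) (p : String × Int) =>
        if p.2 < 4 then
          let k := (PySem.Str.pyGet? p.1 0).getD ' '
          d.insert k (d.getD k 0 + pvScore.getD p.2 0)
        else if p.2 > 4 then
          let k := (PySem.Str.pyGet? p.1 1).getD ' '
          d.insert k (d.getD k 0 + pvScore.getD p.2 0)
        else d) d).keys = pvKind ∧
    ∀ ch, (l.foldl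
      (fun (d : PySem.Dict Char Int) (p : String × Int) =>
        if p.2 < 4 then
          let k := (PySem.Str.pyGet? p.1 0).getD ' '
          d.insert k (d.getD k 0 + pvScore.getD p.2 0)
        else if p.2 > 4 then
          let k := (PySem.Str.pyGet? p.1 1).getD ' '
          d.insert k (d.getD k 0 + pvScore.getD p.2 0)
        else d) d).getD ch 0 = d.getD ch 0 + l.foldr (fun p acc => pvW ch p + acc) 0 := by
  induction l generalizing d with
  | nil => exact ⟨hk, fun ch => by simp⟩
  | cons p l ih =>
    obtain ⟨h1, h2⟩ := hpre p (List.mem_cons_self ..)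
    have hrest := fun q hq => hpre q (List.mem_cons_of_mem _ hq)
    by_cases hlt : p.2 < 4
    · obtain ⟨hc, hne, hmem⟩ := h1 hlt
      have hget : (PySem.Str.pyGet? p.1 0).getD ' ' = p.1.toList.getD 0 ' ' :=
        pvGetChar p.1 0 (List.length_pos_iff.mpr hne)
      have hb := fun ch => pvBump d hk _ (hget ▸ hmem) (4 - p.2) ch
      simp only [List.foldl_cons, if_pos hlt, pvScore_low p.2 hc]
      obtain ⟨ihk, ihv⟩ := ih _ (hb ' ').1 hrest
      refine ⟨ihk, fun ch => ?_⟩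
      rw [ihv ch, (hb ch).2, List.foldr_cons]
      have : pvW ch p = (if (PySem.Str.pyGet? p.1 0).getD ' ' = ch then 4 - p.2 else 0) := by
        simp [pvW, hlt]
      rw [this]; ring
    · by_cases hgt : p.2 > 4
      · obtain ⟨hc, hlen2, hmem⟩ := h2 hgt
        have hget : (PySem.Str.pyGet? p.1 1).getD ' ' = p.1.toList.getD 1 ' ' :=
          pvGetChar p.1 1 (by omega)
        have hb := fun ch => pvBump d hk _ (hget ▸ hmem) (p.2 - 4) ch
        simp only [List.foldl_cons, if_neg hlt, if_pos hgt, pvScore_high p.2 hc]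
        obtain ⟨ihk, ihv⟩ := ih _ (hb ' ').1 hrest
        refine ⟨ihk, fun ch => ?_⟩
        rw [ihv ch, (hb ch).2, List.foldr_cons]
        have : pvW ch p = (if (PySem.Str.pyGet? p.1 1).getD ' ' = ch then p.2 - 4 else 0) := by
          simp [pvW, hlt, hgt]
        rw [this]; ring
      · simp only [List.foldl_cons, if_neg hlt, if_neg hgt]
        obtain ⟨ihk, ihv⟩ := ih d hk hrest
        refine ⟨ihk, fun ch => ?_⟩
        rw [ihv ch, List.foldr_cons]
        have : pvW ch p = 0 := by simp [pvW, hlt, hgt]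
        rw [this]; ring

-- pull the append out of A's three-way branch
lemma pvAppIte (a : List Char) (c c' : Prop) [Decidable c] [Decidable c'] (x y z : Char) :
    (if c then a ++ [x] else if c' then a ++ [y] else a ++ [z]) =
      a ++ [if c then x else if c' then y else z] := by
  split_ifs <;> rfl

-- with keys = pvKind, A's answer loop reduces to a ≥-pick per pair
lemma pvFinal (d : PySem.Dict Char Int) (hk : d.keys = pvKind) :
    ((PySem.List.pyRange 0 (PySem.Dict.size d) 2).foldl
      (fun (ans : List Char) idx =>
        if d.getD (PySem.List.pyGetD pvKind idx ' ') 0 > d.getD (PySem.List.pyGetD pvKind (idx + 1) ' ') 0 then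
          ans ++ [PySem.List.pyGetD d.keys idx ' ']
        else if d.getD (PySem.List.pyGetD pvKind idx ' ') 0 < d.getD (PySem.List.pyGetD pvKind (idx + 1) ' ') 0 then
          ans ++ [PySem.List.pyGetD d.keys (idx + 1) ' ']
        else
          let same := PySem.List.sorted (PySem.List.slice d.keys (some idx) (some (idx + 2))) (fun c => c)
          ans ++ [PySem.List.pyGetD same 0 ' ']) []) =
    [if d.getD 'R' 0 ≥ d.getD 'T' 0 then 'R' else 'T',
     if d.getD 'C' 0 ≥ d.getD 'F' 0 then 'C' else 'F',
     if d.getD 'J' 0 ≥ d.getD 'M' 0 then 'J' else 'M',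
     if d.getD 'A' 0 ≥ d.getD 'N' 0 then 'A' else 'N'] := by
  have hsz : PySem.Dict.size d = 8 := by
    have h8 : d.keys.length = 8 := by rw [hk]; rfl
    simpa [PySem.Dict.size, PySem.Dict.keys] using h8
  rw [hsz, hk]
  rw [show PySem.List.pyRange 0 ((8 : Nat) : Int) 2 = [0, 2, 4, 6] from by decide]
  simp only [List.foldl_cons, List.foldl_nil, pvAppIte, List.nil_append, List.append_assoc,
    List.singleton_append]
  rw [show PySem.List.pyGetD pvKind (0 : Int) ' ' = 'R' from by decide,
      show PySem.List.pyGetD pvKind ((0 : Int) + 1) ' ' = 'T' from by decide,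
      show PySem.List.pyGetD pvKind (2 : Int) ' ' = 'C' from by decide,
      show PySem.List.pyGetD pvKind ((2 : Int) + 1) ' ' = 'F' from by decide,
      show PySem.List.pyGetD pvKind (4 : Int) ' ' = 'J' from by decide,
      show PySem.List.pyGetD pvKind ((4 : Int) + 1) ' ' = 'M' from by decide,
      show PySem.List.pyGetD pvKind (6 : Int) ' ' = 'A' from by decide,
      show PySem.List.pyGetD pvKind ((6 : Int) + 1) ' ' = 'N' from by decide,
      show PySem.List.pyGetD (PySem.List.sorted (PySem.List.slice pvKind (some 0) (some (0 + 2))) (fun c => c)) 0 ' ' = 'R' from by decide,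
      show PySem.List.pyGetD (PySem.List.sorted (PySem.List.slice pvKind (some 2) (some (2 + 2))) (fun c => c)) 0 ' ' = 'C' from by decide,
      show PySem.List.pyGetD (PySem.List.sorted (PySem.List.slice pvKind (some 4) (some (4 + 2))) (fun c => c)) 0 ' ' = 'J' from by decide,
      show PySem.List.pyGetD (PySem.List.sorted (PySem.List.slice pvKind (some 6) (some (6 + 2))) (fun c => c)) 0 ' ' = 'A' from by decide]
  refine congrArg₂ List.cons ?_ (congrArg₂ List.cons ?_ (congrArg₂ List.cons ?_ (congrArg₂ List.cons ?_ rfl))) <;>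
    (split_ifs <;> first | rfl | omega)

-- ===== VERDICT (by name: the statements are the Claim_ definitions above) =====
theorem solution_spec : Claim_equal_solution := by
  intro survey choices _ hpre
  unfold Spec_solution solution solution_alt
  have hk0 : (pvKind.foldl (fun (d : PySem.Dict Char Int) k => d.insert k 0) PySem.Dict.empty).keys = pvKind := by decide
  obtain ⟨hkeys, hval⟩ := pvLoop (survey.zip choices) _ hk0 hpre
  have hv : ∀ ch ∈ pvKind,
      ((survey.zip choices).foldl
        (fun (d : PySem.Dict Char Int) (p : String × Int) =>
          if p.2 < 4 then
            let k := (PySem.Str.pyGet? p.1 0).getD ' '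
            d.insert k (d.getD k 0 + pvScore.getD p.2 0)
          else if p.2 > 4 then
            let k := (PySem.Str.pyGet? p.1 1).getD ' '
            d.insert k (d.getD k 0 + pvScore.getD p.2 0)
          else d)
        (pvKind.foldl (fun (d : PySem.Dict Char Int) k => d.insert k 0) PySem.Dict.empty)).getD ch 0
      = pvLean (survey.zip choices) ch := by
    intro ch hch
    rw [hval ch, pvLean_foldr]
    have h0 : (pvKind.foldl (fun (d : PySem.Dict Char Int) k => d.insert k 0) PySem.Dict.empty).getD ch 0 = 0 := by
      fin_cases hch <;> decide
    rw [h0]; ring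
  refine (congrArg String.mk (pvFinal _ hkeys)).trans ?_
  rw [hv 'R' (by decide), hv 'T' (by decide), hv 'C' (by decide), hv 'F' (by decide),
      hv 'J' (by decide), hv 'M' (by decide), hv 'A' (by decide), hv 'N' (by decide)]
  rfl
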